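-- pv_equiv track=rewrite | github.com/JoshH28/CP_cpp | CALICO/contest/qn6.py | generate_visible_houses
-- ===== SOURCE A (Python) =====
-- from math import gcd
-- from typing import List, Tuple
--
-- def generate_visible_houses(limit: int) -> List[Tuple[int, int]]:
--     """
--     Generate coordinates of visible houses from (0,0) up to a certain Manhattan distance limit.
--     Returns list of (x,y) coordinates sorted by Manhattan distance and x-coordinate.
--     """
--     houses = []
--
--     # For each x,y within the limit of Manhattan distance
--     for manhattan_dist in range(1, limit + 1):
--         for x in range(0, manhattan_dist + 1):
--             y = manhattan_dist - x
--             if y == 0:  # Handle x-axis points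
--                 if x > 0:  # Exclude origin
--                     houses.append((x, y))
--             elif x == 0:  # Handle y-axis points
--                 houses.append((x, y))
--             else:
--                 # Only add point if it's visible (gcd of coordinates is 1)
--                 if gcd(x, y) == 1:
--                     houses.append((x, y))
--
--     # Sort houses by Manhattan distance, then by x coordinate
--     houses.sort(key=lambda p: (p[0] + p[1], p[0]))
--     return houses
-- ===== SOURCE B (Python) =====
-- from typing import List, Tuple
--
-- def generate_visible_houses(limit: int) -> List[Tuple[int, int]]:
--     """
--     Generate coordinates of visible houses from (0,0) up to a certain Manhattan distance limit.
--     Returns list of (x,y) coordinates sorted by Manhattan distance and x-coordinate.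
--
--     Sieve formulation, no gcd: a strictly interior point is hidden exactly when it is a
--     proper multiple k*(a,b), k >= 2, of another interior point, so mark every such multiple.
--     Points are handled as single integers encoding the sort key (manhattan, x):
--     a point (x, y) is the integer (x + y) * M + x with M = limit + 1, an encoding that is
--     multiplied by k exactly as the point is, orders like the (manhattan, x) key, and sorts
--     at int speed.
--     """
--     M = limit + 1
--     hidden = set()
--     for x in range(1, limit // 2 + 1):
--         for y in range(1, limit // 2 + 1 - x):
--             c = (x + y) * M + x
--             for k in range(2, limit // (x + y) + 1):
--                 hidden.add(k * c)
--     keyed = []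
--     for x in range(1, M):
--         for y in range(1, M - x):
--             c = (x + y) * M + x
--             if c not in hidden:
--                 keyed.append(c)
--     for k in range(1, M):
--         keyed.append(k * M + k)  # the x-axis point (k, 0)
--         keyed.append(k * M)      # the y-axis point (0, k)
--     keyed.sort()
--     houses = []
--     for c in keyed:
--         s, x = divmod(c, M)
--         houses.append((x, s - x))
--     return houses
-- ===== Notes on version B (the rewrite author's own statement) =====
-- stated objective: alternative
-- what changed: Replaces A's per-point gcd test along each diagonal by a multiples sieve over int-encoded points: every proper multiple k*(a,b) (k>=2) of an interior point is marked hidden in a set of integer codes (x+y)*(limit+1)+x, the unmarked interior codes plus the axis codes are sorted as plain ints and decoded back to pairs; no gcd is computed anywhere.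
import Mathlib
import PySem

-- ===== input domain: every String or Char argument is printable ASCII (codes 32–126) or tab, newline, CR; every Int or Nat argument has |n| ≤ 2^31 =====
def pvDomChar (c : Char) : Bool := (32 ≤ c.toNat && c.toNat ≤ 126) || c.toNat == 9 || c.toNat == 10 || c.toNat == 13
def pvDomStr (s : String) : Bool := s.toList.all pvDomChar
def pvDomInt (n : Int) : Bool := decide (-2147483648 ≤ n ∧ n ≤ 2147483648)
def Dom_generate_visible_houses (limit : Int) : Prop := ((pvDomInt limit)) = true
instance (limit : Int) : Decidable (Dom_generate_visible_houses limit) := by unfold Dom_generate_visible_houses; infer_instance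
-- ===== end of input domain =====

-- B replaces A's gcd-per-point diagonal walk by a multiples sieve over int-encoded points:
-- every proper multiple k*(a,b), k>=2, of an interior point is marked hidden in a set of
-- integer codes (x+y)*(limit+1)+x, the unmarked codes plus the axis codes are sorted as
-- ints and decoded — no gcd anywhere (alternative).


-- ===== PORT A =====
def generate_visible_houses (limit : Int) : List (Int × Int) :=
  let houses : List (Int × Int) :=
    (PySem.List.pyRange 1 (limit + 1) 1).foldl (fun houses manhattan_dist =>
      (PySem.List.pyRange 0 (manhattan_dist + 1) 1).foldl (fun houses x =>
        let y := manhattan_dist - x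
        if y = 0 then
          (if x > 0 then houses ++ [(x, y)] else houses)
        else if x = 0 then
          houses ++ [(x, y)]
        else
          if Int.gcd x y = 1 then houses ++ [(x, y)] else houses) houses) []
  PySem.List.sorted2 houses (fun p => p.1 + p.2) (fun p => p.1)

-- ===== PORT B =====
def generate_visible_houses_alt (limit : Int) : List (Int × Int) :=
  let M := limit + 1
  let hidden : PySem.Set Int :=
    (PySem.List.pyRange 1 (PySem.Int.floordiv limit 2 + 1) 1).foldl (fun hidden x =>
      (PySem.List.pyRange 1 (PySem.Int.floordiv limit 2 + 1 - x) 1).foldl (fun hidden y =>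
        let c := (x + y) * M + x
        (PySem.List.pyRange 2 (PySem.Int.floordiv limit (x + y) + 1) 1).foldl
          (fun hidden k => PySem.Set.add hidden (k * c)) hidden) hidden) PySem.Set.empty
  let keyed : List Int :=
    (PySem.List.pyRange 1 M 1).foldl (fun keyed x =>
      (PySem.List.pyRange 1 (M - x) 1).foldl (fun keyed y =>
        let c := (x + y) * M + x
        if !(PySem.Set.contains hidden c) then keyed ++ [c] else keyed) keyed) []
  let keyed :=
    (PySem.List.pyRange 1 M 1).foldl (fun keyed k => (keyed ++ [k * M + k]) ++ [k * M]) keyed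
  let keyed := PySem.List.sorted keyed (fun c => c)
  let houses : List (Int × Int) :=
    keyed.foldl (fun houses c =>
      let s := PySem.Int.floordiv c M    -- s, x = divmod(c, M)
      let x := PySem.Int.mod c M
      houses ++ [(x, s - x)]) []
  houses

-- ===== PRECONDITION & SPEC =====
def Spec_generate_visible_houses (limit : Int) (out : List (Int × Int)) : Prop := out = generate_visible_houses_alt limit
instance (limit : Int) (out : List (Int × Int)) : Decidable (Spec_generate_visible_houses limit out) := by unfold Spec_generate_visible_houses; infer_instance

-- ===== CLAIM (what is proved, stated in full; the proofs are below) =====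
def Claim_equal_generate_visible_houses : Prop := ∀ (limit : Int), Dom_generate_visible_houses limit → Spec_generate_visible_houses limit (generate_visible_houses limit)

-- ===== LEMMAS AND PROOFS =====

-- A's branch condition, flattened to one Bool test
def pvCondA (d x : Int) : Bool :=
  if d - x = 0 then decide (x > 0)
  else if x = 0 then true
  else decide (Int.gcd x (d - x) = 1)

-- pre-sort list of port A
def pvLA (limit : Int) : List (Int × Int) :=
  (PySem.List.pyRange 1 (limit + 1) 1).flatMap (fun d =>
    ((PySem.List.pyRange 0 (d + 1) 1).filter (pvCondA d)).map (fun x => (x, d - x)))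

-- B's interior grid, int encoding, hidden code set, point list and key list
def pvInterior (limit : Int) : List (Int × Int) :=
  (PySem.List.pyRange 1 (limit + 1) 1).flatMap (fun x =>
    (PySem.List.pyRange 1 (limit + 1 - x) 1).map (fun y => (x, y)))

def pvEnc (limit : Int) (p : Int × Int) : Int := (p.1 + p.2) * (limit + 1) + p.1

def pvHiddenB (limit : Int) : PySem.Set Int :=
  (PySem.List.pyRange 1 (PySem.Int.floordiv limit 2 + 1) 1).foldl (fun hidden x =>
    (PySem.List.pyRange 1 (PySem.Int.floordiv limit 2 + 1 - x) 1).foldl (fun hidden y =>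
      (PySem.List.pyRange 2 (PySem.Int.floordiv limit (x + y) + 1) 1).foldl
        (fun hidden k => PySem.Set.add hidden (k * ((x + y) * (limit + 1) + x))) hidden) hidden)
    PySem.Set.empty

def pvPts (limit : Int) : List (Int × Int) :=
  (pvInterior limit).filter
      (fun p => !(PySem.Set.contains (pvHiddenB limit) (pvEnc limit p))) ++
    (PySem.List.pyRange 1 (limit + 1) 1).flatMap (fun k => [(k, 0), (0, k)])

def pvKeys (limit : Int) : List Int :=
  (PySem.List.pyRange 1 (limit + 1) 1).flatMap (fun x =>
    ((PySem.List.pyRange 1 (limit + 1 - x) 1).filter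
        (fun y => !(PySem.Set.contains (pvHiddenB limit) ((x + y) * (limit + 1) + x)))).map
      (fun y => (x + y) * (limit + 1) + x)) ++
  (PySem.List.pyRange 1 (limit + 1) 1).flatMap (fun k => [k * (limit + 1) + k, k * (limit + 1)])

-- the flat Int key that agrees with the (sum, x) lex key on our points
def pvKey (p : Int × Int) : Int := (p.1 + p.2) * 8589934592 + p.1

lemma pvA_eq (limit : Int) :
    generate_visible_houses limit
      = PySem.List.sorted2 (pvLA limit) (fun p => p.1 + p.2) (fun p => p.1) := by
  unfold generate_visible_houses pvLA
  have hinner : ∀ (d : Int) (acc : List (Int × Int)),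
      (PySem.List.pyRange 0 (d + 1) 1).foldl (fun houses x =>
        let y := d - x
        if y = 0 then
          (if x > 0 then houses ++ [(x, y)] else houses)
        else if x = 0 then
          houses ++ [(x, y)]
        else
          if Int.gcd x y = 1 then houses ++ [(x, y)] else houses) acc
      = acc ++ ((PySem.List.pyRange 0 (d + 1) 1).filter (pvCondA d)).map (fun x => (x, d - x)) := by
    intro d acc
    have hfun : (fun (houses : List (Int × Int)) (x : Int) =>
        let y := d - x
        if y = 0 then
          (if x > 0 then houses ++ [(x, y)] else houses)
        else if x = 0 then
          houses ++ [(x, y)]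
        else
          if Int.gcd x y = 1 then houses ++ [(x, y)] else houses)
        = fun houses x => if pvCondA d x then houses ++ [(x, d - x)] else houses := by
      funext houses x
      simp only [pvCondA]
      split_ifs <;> first | rfl | omega | (simp_all <;> omega)
    rw [hfun, PySem.List.foldl_append_if]
  have houter : (fun (acc : List (Int × Int)) (d : Int) =>
      (PySem.List.pyRange 0 (d + 1) 1).foldl (fun houses x =>
        let y := d - x
        if y = 0 then
          (if x > 0 then houses ++ [(x, y)] else houses)
        else if x = 0 then
          houses ++ [(x, y)]
        else
          if Int.gcd x y = 1 then houses ++ [(x, y)] else houses) acc)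
      = fun acc d => acc ++ ((PySem.List.pyRange 0 (d + 1) 1).filter (pvCondA d)).map (fun x => (x, d - x)) := by
    funext acc d
    exact hinner d acc
  rw [houter, PySem.List.foldl_append_eq_flatMap]
  simp

lemma pvB_eq (limit : Int) :
    generate_visible_houses_alt limit
      = (PySem.List.sorted (pvKeys limit) (fun c => c)).map
          (fun c => (PySem.Int.mod c (limit + 1),
            PySem.Int.floordiv c (limit + 1) - PySem.Int.mod c (limit + 1))) := by
  unfold generate_visible_houses_alt pvKeys pvHiddenB
  have hax : (fun (keyed : List Int) (k : Int) =>
      (keyed ++ [k * (limit + 1) + k]) ++ [k * (limit + 1)])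
      = fun keyed k => keyed ++ [k * (limit + 1) + k, k * (limit + 1)] := by
    funext keyed k
    simp
  simp only [PySem.List.foldl_append_if, PySem.List.foldl_append_eq_flatMap,
    hax, List.nil_append]
  exact (List.map_eq_flatMap).symm

-- membership in a fold of Set.adds
lemma pv_mem_foldl_set {γ α : Type} [BEq α] [LawfulBEq α]
    (f : PySem.Set α → γ → PySem.Set α) (Q : γ → α → Prop)
    (hf : ∀ s c p, p ∈ f s c ↔ p ∈ s ∨ Q c p) :
    ∀ (l : List γ) (s₀ : PySem.Set α) (p : α),
      p ∈ l.foldl f s₀ ↔ p ∈ s₀ ∨ ∃ c ∈ l, Q c p := by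
  intro l
  induction l with
  | nil => simp
  | cons c cs ih =>
    intro s₀ p
    simp only [List.foldl_cons, ih, hf, List.mem_cons]
    constructor
    · rintro ((h | h) | ⟨c', hc', h⟩)
      · exact Or.inl h
      · exact Or.inr ⟨c, Or.inl rfl, h⟩
      · exact Or.inr ⟨c', Or.inr hc', h⟩
    · rintro (h | ⟨c', (rfl | hc'), h⟩)
      · exact Or.inl (Or.inl h)
      · exact Or.inl (Or.inr h)
      · exact Or.inr ⟨c', hc', h⟩

lemma pv_mem_interior (limit : Int) (p : Int × Int) :
    p ∈ pvInterior limit ↔ 1 ≤ p.1 ∧ 1 ≤ p.2 ∧ p.1 + p.2 ≤ limit := by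
  obtain ⟨a, b⟩ := p
  simp only [pvInterior, List.mem_flatMap, List.mem_map, PySem.List.mem_pyRange_one]
  constructor
  · rintro ⟨x, ⟨hx1, hx2⟩, y, ⟨hy1, hy2⟩, h⟩
    simp only [Prod.mk.injEq] at h
    obtain ⟨rfl, rfl⟩ := h
    exact ⟨hx1, hy1, by omega⟩
  · rintro ⟨h1, h2, h3⟩
    exact ⟨a, ⟨h1, by omega⟩, b, ⟨h2, by omega⟩, rfl⟩

lemma pv_mem_hiddenB (limit : Int) (c : Int) :
    c ∈ pvHiddenB limit ↔
      ∃ x y k : Int, 1 ≤ x ∧ 1 ≤ y ∧ x + y ≤ PySem.Int.floordiv limit 2 ∧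
        2 ≤ k ∧ k ≤ PySem.Int.floordiv limit (x + y) ∧
        c = k * ((x + y) * (limit + 1) + x) := by
  unfold pvHiddenB
  rw [pv_mem_foldl_set
    (Q := fun x r => ∃ y k : Int, 1 ≤ y ∧ x + y ≤ PySem.Int.floordiv limit 2 ∧
      2 ≤ k ∧ k ≤ PySem.Int.floordiv limit (x + y) ∧
      r = k * ((x + y) * (limit + 1) + x))]
  · constructor
    · rintro (h | ⟨x, hx, y, k, h1, h2, h3, h4, h5⟩)
      · exact absurd h (by simp [PySem.Set.empty])
      · rw [PySem.List.mem_pyRange_one] at hx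
        exact ⟨x, y, k, hx.1, h1, h2, h3, h4, h5⟩
    · rintro ⟨x, y, k, h0, h1, h2, h3, h4, h5⟩
      refine Or.inr ⟨x, PySem.List.mem_pyRange_one.mpr ⟨h0, by omega⟩, y, k, h1, h2, h3, h4, h5⟩
  · intro s x r
    rw [pv_mem_foldl_set
      (Q := fun y r => ∃ k : Int, 2 ≤ k ∧ k ≤ PySem.Int.floordiv limit (x + y) ∧
        r = k * ((x + y) * (limit + 1) + x))]
    · constructor
      · rintro (h | ⟨y, hy, k, h3, h4, h5⟩)
        · exact Or.inl h
        · rw [PySem.List.mem_pyRange_one] at hy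
          exact Or.inr ⟨y, k, hy.1, by omega, h3, h4, h5⟩
      · rintro (h | ⟨y, k, h1, h2, h3, h4, h5⟩)
        · exact Or.inl h
        · exact Or.inr ⟨y, PySem.List.mem_pyRange_one.mpr ⟨h1, by omega⟩, k, h3, h4, h5⟩
    · intro s y r
      rw [pv_mem_foldl_set (Q := fun k r => r = k * ((x + y) * (limit + 1) + x))]
      · constructor
        · rintro (h | ⟨k, hk, h⟩)
          · exact Or.inl h
          · rw [PySem.List.mem_pyRange_one] at hk
            exact Or.inr ⟨k, hk.1, by omega, h⟩
        · rintro (h | ⟨k, h1, h2, h⟩)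
          · exact Or.inl h
          · exact Or.inr ⟨k, PySem.List.mem_pyRange_one.mpr ⟨h1, by omega⟩, h⟩
      · intro s k r
        rw [PySem.Set.mem_add]

-- the encoding orders points like the (manhattan, x) key, and is injective on codes in range
lemma pv_enc_lt (M sa xa sb xb : Int) (hxa0 : 0 ≤ xa) (hxaM : xa < M) (hxb0 : 0 ≤ xb)
    (h : sa < sb ∨ (sa = sb ∧ xa < xb)) : sa * M + xa < sb * M + xb := by
  rcases h with h | ⟨rfl, h⟩
  · have h1 : (sa + 1) * M ≤ sb * M := mul_le_mul_of_nonneg_right (by omega) (by omega)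
    nlinarith
  · linarith

lemma pv_enc_inj (M sa xa sb xb : Int) (hxa0 : 0 ≤ xa) (hxaM : xa < M) (hxb0 : 0 ≤ xb)
    (hxbM : xb < M) (h : sa * M + xa = sb * M + xb) : sa = sb ∧ xa = xb := by
  rcases lt_trichotomy sa sb with ht | ht | ht
  · exact absurd h (ne_of_lt (pv_enc_lt M sa xa sb xb hxa0 hxaM hxb0 (Or.inl ht)))
  · exact ⟨ht, by subst ht; linarith⟩
  · exact absurd h.symm (ne_of_lt (pv_enc_lt M sb xb sa xa hxb0 hxbM hxa0 (Or.inl ht)))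

-- sieve correctness: inside the interior grid, 'hidden' holds a code exactly when gcd ≠ 1
lemma pv_hiddenB_iff_gcd (limit : Int) (p : Int × Int) (hp : p ∈ pvInterior limit) :
    pvEnc limit p ∈ pvHiddenB limit ↔ Int.gcd p.1 p.2 ≠ 1 := by
  rw [pv_mem_interior] at hp
  obtain ⟨hp1, hp2, hp3⟩ := hp
  rw [pv_mem_hiddenB]
  constructor
  · rintro ⟨x, y, k, h1, h2, h3, h4, h5, heq⟩
    have hs2 : (x + y) * 2 ≤ limit := by
      rw [← PySem.Int.le_floordiv_iff_mul_le (by omega : (0:Int) < 2)]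
      exact h3
    have hks : k * (x + y) ≤ limit := by
      rw [← PySem.Int.le_floordiv_iff_mul_le (by omega : (0:Int) < x + y)]
      exact h5
    have hkx0 : 0 ≤ k * x := by positivity
    have hky0 : 0 ≤ k * y := by positivity
    have hkxM : k * x < limit + 1 := by nlinarith
    have heq' : pvEnc limit p = (k * x + k * y) * (limit + 1) + k * x := by
      rw [heq]; ring
    unfold pvEnc at heq'
    obtain ⟨hsum, hfst⟩ := pv_enc_inj (limit + 1) (p.1 + p.2) p.1 (k * x + k * y) (k * x)
      (by omega) (by omega) (by omega) (by omega) heq'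
    have hx : p.1 = k * x := hfst
    have hy : p.2 = k * y := by linarith
    rw [hx, hy, Int.gcd_mul_left]
    have hg : 1 ≤ Int.gcd x y := by
      have : x ≠ 0 := by omega
      have := Int.gcd_pos_of_ne_zero_left y this
      omega
    have hk : 2 ≤ k.natAbs := by omega
    intro hcon
    have := Nat.eq_one_of_mul_eq_one_right hcon
    omega
  · intro hg
    have hgd : (Int.gcd p.1 p.2 : Int) ∣ p.1 := Int.gcd_dvd_left p.1 p.2
    have hgd2 : (Int.gcd p.1 p.2 : Int) ∣ p.2 := Int.gcd_dvd_right p.1 p.2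
    obtain ⟨a, ha⟩ := hgd
    obtain ⟨b, hb⟩ := hgd2
    set g : Int := (Int.gcd p.1 p.2 : Int) with hgdef
    have hg1 : 1 ≤ Int.gcd p.1 p.2 := by
      have : p.1 ≠ 0 := by omega
      have := Int.gcd_pos_of_ne_zero_left p.2 this
      omega
    have hg2 : 2 ≤ g := by
      rw [hgdef]
      exact_mod_cast (by omega : 2 ≤ Int.gcd p.1 p.2)
    have ha1 : 1 ≤ a := by nlinarith
    have hb1 : 1 ≤ b := by nlinarith
    have hsum : g * (a + b) = p.1 + p.2 := by rw [mul_add, ← ha, ← hb]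
    refine ⟨a, b, g, ha1, hb1, ?_, hg2, ?_, ?_⟩
    · rw [PySem.Int.le_floordiv_iff_mul_le (by omega : (0:Int) < 2)]
      nlinarith
    · rw [PySem.Int.le_floordiv_iff_mul_le (by omega : (0:Int) < a + b)]
      omega
    · unfold pvEnc
      rw [ha, hb]
      ring

lemma pv_mem_LA (limit : Int) (p : Int × Int) :
    p ∈ pvLA limit ↔
      (0 ≤ p.1 ∧ 0 ≤ p.2 ∧ 1 ≤ p.1 + p.2 ∧ p.1 + p.2 ≤ limit ∧
        (p.1 = 0 ∨ p.2 = 0 ∨ Int.gcd p.1 p.2 = 1)) := by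
  obtain ⟨a, b⟩ := p
  simp only [pvLA, List.mem_flatMap, List.mem_map, List.mem_filter,
    PySem.List.mem_pyRange_one, pvCondA]
  constructor
  · rintro ⟨d, ⟨hd1, hd2⟩, x, ⟨⟨hx1, hx2⟩, hcond⟩, hp⟩
    have hpa : x = a ∧ d - x = b := by
      have := hp
      simp only [Prod.mk.injEq] at this
      exact this
    obtain ⟨rfl, hy⟩ := hpa
    subst hy
    split_ifs at hcond with c1 c2
    · simp only [decide_eq_true_eq] at hcond
      refine ⟨by omega, by omega, by omega, by omega, by omega⟩
    · refine ⟨by omega, by omega, by omega, by omega, Or.inl c2⟩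
    · simp only [decide_eq_true_eq] at hcond
      exact ⟨by omega, by omega, by omega, by omega, Or.inr (Or.inr hcond)⟩
  · rintro ⟨h1, h2, h3, h4, h5⟩
    refine ⟨a + b, ⟨by omega, by omega⟩, a, ⟨⟨by omega, by omega⟩, ?_⟩, by simp⟩
    have hy : a + b - a = b := by omega
    rw [hy]
    split_ifs with c1 c2
    · simp only [decide_eq_true_eq]; omega
    · rfl
    · simp only [decide_eq_true_eq]
      rcases h5 with h | h | h
      · exact absurd h c2
      · omega
      · exact h

lemma pv_mem_pts (limit : Int) (p : Int × Int) :
    p ∈ pvPts limit ↔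
      (0 ≤ p.1 ∧ 0 ≤ p.2 ∧ 1 ≤ p.1 + p.2 ∧ p.1 + p.2 ≤ limit ∧
        (p.1 = 0 ∨ p.2 = 0 ∨ Int.gcd p.1 p.2 = 1)) := by
  obtain ⟨a, b⟩ := p
  simp only [pvPts, List.mem_append, List.mem_filter, List.mem_flatMap,
    PySem.List.mem_pyRange_one, List.mem_cons, List.not_mem_nil, or_false]
  constructor
  · rintro (⟨hin, hnh⟩ | ⟨k, ⟨hk1, hk2⟩, (h | h)⟩)
    · have hmem := hin
      rw [pv_mem_interior] at hmem
      obtain ⟨h1, h2, h3⟩ := hmem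
      have hnm : pvEnc limit (a, b) ∉ pvHiddenB limit := by
        intro hm
        rw [← PySem.Set.contains_iff] at hm
        rw [hm] at hnh
        simp at hnh
      have hgcd : Int.gcd a b = 1 := by
        by_contra hc
        exact hnm ((pv_hiddenB_iff_gcd limit (a, b) hin).mpr hc)
      exact ⟨by omega, by omega, by omega, by omega, Or.inr (Or.inr hgcd)⟩
    · simp only [Prod.mk.injEq] at h
      obtain ⟨rfl, rfl⟩ := h
      exact ⟨by omega, le_refl _, by omega, by omega, Or.inr (Or.inl rfl)⟩
    · simp only [Prod.mk.injEq] at h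
      obtain ⟨rfl, rfl⟩ := h
      exact ⟨le_refl _, by omega, by omega, by omega, Or.inl rfl⟩
  · rintro ⟨h1, h2, h3, h4, h5⟩
    by_cases hb0 : b = 0
    · subst hb0
      exact Or.inr ⟨a, ⟨by omega, by omega⟩, Or.inl rfl⟩
    by_cases ha0 : a = 0
    · subst ha0
      exact Or.inr ⟨b, ⟨by omega, by omega⟩, Or.inr rfl⟩
    · have hin : (a, b) ∈ pvInterior limit :=
        (pv_mem_interior limit (a, b)).mpr ⟨by omega, by omega, h4⟩
      refine Or.inl ⟨hin, ?_⟩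
      have hg : Int.gcd a b = 1 := by tauto
      have hnm : pvEnc limit (a, b) ∉ pvHiddenB limit := by
        rw [pv_hiddenB_iff_gcd limit (a, b) hin]
        simp [hg]
      simpa using hnm

-- A's list is strictly increasing in (sum, x)
lemma pv_pairwise_LA (limit : Int) :
    (pvLA limit).Pairwise (fun p q =>
      p.1 + p.2 < q.1 + q.2 ∨ (p.1 + p.2 = q.1 + q.2 ∧ p.1 < q.1)) := by
  unfold pvLA
  rw [List.pairwise_flatMap]
  constructor
  · intro d _
    rw [List.pairwise_map]
    refine List.Pairwise.imp_of_mem ?_ ((PySem.List.pairwise_lt_pyRange_one 0 (d + 1)).filter (pvCondA d))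
    intro x y _ _ hxy
    right
    exact ⟨by omega, hxy⟩
  · refine List.Pairwise.imp_of_mem ?_ (PySem.List.pairwise_lt_pyRange_one 1 (limit + 1))
    intro d e _ _ hde p hp q hq
    simp only [List.mem_map, List.mem_filter] at hp hq
    obtain ⟨x, _, rfl⟩ := hp
    obtain ⟨y, _, rfl⟩ := hq
    left
    simp only
    omega

lemma pv_nodup_LA (limit : Int) : (pvLA limit).Nodup :=
  (pv_pairwise_LA limit).imp_of_mem (fun _ _ h => by rintro rfl; omega)

-- B's interior grid is strictly increasing in (x, y), hence nodup
lemma pv_pairwise_interior (limit : Int) :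
    (pvInterior limit).Pairwise (fun p q => p.1 < q.1 ∨ (p.1 = q.1 ∧ p.2 < q.2)) := by
  unfold pvInterior
  rw [List.pairwise_flatMap]
  constructor
  · intro x _
    rw [List.pairwise_map]
    refine List.Pairwise.imp_of_mem ?_ (PySem.List.pairwise_lt_pyRange_one 1 (limit + 1 - x))
    intro y z _ _ hyz
    right
    exact ⟨rfl, hyz⟩
  · refine List.Pairwise.imp_of_mem ?_ (PySem.List.pairwise_lt_pyRange_one 1 (limit + 1))
    intro x y _ _ hxy p hp q hq
    simp only [List.mem_map] at hp hq
    obtain ⟨u, _, rfl⟩ := hp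
    obtain ⟨v, _, rfl⟩ := hq
    left
    exact hxy

lemma pv_nodup_interior (limit : Int) : (pvInterior limit).Nodup :=
  (pv_pairwise_interior limit).imp_of_mem (fun _ _ h => by rintro rfl; omega)

lemma pv_nodup_pts (limit : Int) : (pvPts limit).Nodup := by
  unfold pvPts
  rw [List.nodup_append]
  refine ⟨(pv_nodup_interior limit).filter _, ?_, ?_⟩
  · have : ((PySem.List.pyRange 1 (limit + 1) 1).flatMap
        (fun k => [((k : Int), (0 : Int)), (0, k)])).Pairwise (· ≠ ·) := by
      rw [List.pairwise_flatMap]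
      constructor
      · intro k hk
        rw [PySem.List.mem_pyRange_one] at hk
        refine List.pairwise_cons.mpr ⟨?_, by simp⟩
        intro p hp
        simp only [List.mem_cons, List.not_mem_nil, or_false] at hp
        subst hp
        intro h
        simp only [Prod.mk.injEq] at h
        omega
      · refine List.Pairwise.imp_of_mem ?_ (PySem.List.pairwise_lt_pyRange_one 1 (limit + 1))
        intro k k' hk hk' hlt p hp q hq
        rw [PySem.List.mem_pyRange_one] at hk hk'
        simp only [List.mem_cons, List.not_mem_nil, or_false] at hp hq
        rcases hp with rfl | rfl <;> rcases hq with rfl | rfl <;> intro h <;>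
          simp only [Prod.mk.injEq] at h <;> omega
    exact this
  · intro p hp q hq
    rw [List.mem_filter] at hp
    have h1 := (pv_mem_interior limit p).mp hp.1
    simp only [List.mem_flatMap, PySem.List.mem_pyRange_one, List.mem_cons,
      List.not_mem_nil, or_false] at hq
    obtain ⟨k, ⟨hk1, _⟩, (rfl | rfl)⟩ := hq <;> rintro rfl <;> simp at h1

lemma pv_perm (limit : Int) : (pvLA limit).Perm (pvPts limit) :=
  (List.perm_ext_iff_of_nodup (pv_nodup_LA limit) (pv_nodup_pts limit)).mpr
    (fun p => by rw [pv_mem_LA, pv_mem_pts])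

-- the keys B sorts are exactly the encodings of B's point list
lemma pv_keys_eq (limit : Int) : pvKeys limit = (pvPts limit).map (pvEnc limit) := by
  unfold pvKeys pvPts pvInterior
  rw [List.map_append]
  congr 1
  · rw [List.filter_flatMap, List.map_flatMap]
    refine List.flatMap_congr ?_
    intro x _
    rw [List.filter_map, List.map_map]
    refine congrArg _ (List.filter_congr ?_)
    intro y _
    simp [pvEnc]
  · rw [List.map_flatMap]
    refine List.flatMap_congr ?_
    intro k _
    simp only [List.map_cons, List.map_nil, pvEnc]
    norm_num

-- insertBy only looks at comparisons of x against members of acc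
lemma pv_insertBy_congr {α : Type} (f g : α → α → Bool) (x : α) (acc : List α)
    (h : ∀ b ∈ acc, f x b = g x b) :
    PySem.List.insertBy f x acc = PySem.List.insertBy g x acc := by
  induction acc with
  | nil => rfl
  | cons y ys ih =>
    simp only [PySem.List.insertBy]
    rw [h y (by simp)]
    split
    · rfl
    · have := ih (fun b hb => h b (by simp [hb]))
      rw [this]

lemma pv_foldl_insertBy_congr {α : Type} (f g : α → α → Bool) (xs : List α)
    (h : ∀ a ∈ xs, ∀ b ∈ xs, f a b = g a b) :
    xs.foldl (fun acc x => PySem.List.insertBy f x acc) []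
      = xs.foldl (fun acc x => PySem.List.insertBy g x acc) [] := by
  have aux : ∀ (ys acc : List α), (∀ a ∈ ys, ∀ b ∈ acc, f a b = g a b) →
      (∀ a ∈ ys, ∀ b ∈ ys, f a b = g a b) →
      ys.foldl (fun acc x => PySem.List.insertBy f x acc) acc
        = ys.foldl (fun acc x => PySem.List.insertBy g x acc) acc := by
    intro ys
    induction ys with
    | nil => intro acc _ _; rfl
    | cons w ws ih =>
      intro acc hacc hys
      simp only [List.foldl_cons]
      rw [pv_insertBy_congr f g w acc (fun c hc => hacc w (by simp) c hc)]
      refine ih (PySem.List.insertBy g w acc) ?_ ?_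
      · intro a ha c hc
        rcases (PySem.List.mem_insertBy g w c acc).mp hc with h | h
        · rw [h]; exact hys a (by simp [ha]) w (by simp)
        · exact hacc a (by simp [ha]) c h
      · intro a ha c hc
        exact hys a (by simp [ha]) c (by simp [hc])
  exact aux xs [] (by simp) h

-- sorted2 with the (sum, x) key equals sorted with the flat key, on lists of in-bound points
lemma pv_sorted2_eq_sorted (l : List (Int × Int))
    (hb : ∀ p ∈ l, 0 ≤ p.1 ∧ p.1 < 8589934592) :
    PySem.List.sorted2 l (fun p => p.1 + p.2) (fun p => p.1)
      = PySem.List.sorted l pvKey := by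
  rw [PySem.List.sorted_eq_foldl_insertBy]
  show l.foldl (fun acc x => PySem.List.insertBy
      (fun a b => decide (a.1 + a.2 < b.1 + b.2) || !decide (b.1 + b.2 < a.1 + a.2) && decide (a.1 < b.1)) x acc) []
    = l.foldl (fun acc x => PySem.List.insertBy (fun a b => decide (pvKey a < pvKey b)) x acc) []
  apply pv_foldl_insertBy_congr
  intro a ha b hbm
  obtain ⟨ha1, ha2⟩ := hb a ha
  obtain ⟨hb1, hb2⟩ := hb b hbm
  by_cases h1 : a.1 + a.2 < b.1 + b.2 <;> by_cases h2 : b.1 + b.2 < a.1 + a.2 <;>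
    by_cases h3 : a.1 < b.1 <;>
      simp only [h1, h2, h3, pvKey, decide_true, decide_false, Bool.true_or, Bool.false_or,
        Bool.not_true, Bool.not_false, Bool.false_and, Bool.true_and, Bool.or_false] <;>
      first
        | (symm; rw [decide_eq_true_eq]; omega)
        | (symm; rw [decide_eq_false_iff_not]; omega)

-- decoding a code of an admissible point recovers the point
lemma pv_dec_enc (limit : Int) (p : Int × Int) (h1 : 0 ≤ p.1) (h2 : 0 ≤ p.2)
    (h3 : 1 ≤ p.1 + p.2) (h4 : p.1 + p.2 ≤ limit) :
    (PySem.Int.mod (pvEnc limit p) (limit + 1),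
      PySem.Int.floordiv (pvEnc limit p) (limit + 1)
        - PySem.Int.mod (pvEnc limit p) (limit + 1)) = p := by
  have hM : (0 : Int) < limit + 1 := by omega
  unfold pvEnc
  rw [PySem.Int.mod_eq_emod_of_pos hM, PySem.Int.floordiv_eq_ediv_of_pos hM]
  have hmod : ((p.1 + p.2) * (limit + 1) + p.1) % (limit + 1) = p.1 := by
    rw [add_comm, mul_comm, Int.add_mul_emod_self_left]
    exact Int.emod_eq_of_lt h1 (by omega)
  have hdiv : ((p.1 + p.2) * (limit + 1) + p.1) / (limit + 1) = p.1 + p.2 := by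
    rw [add_comm, mul_comm, Int.add_mul_ediv_left _ _ (by omega : (limit + 1) ≠ 0),
      Int.ediv_eq_zero_of_lt h1 (by omega)]
    omega
  rw [hmod, hdiv]
  exact Prod.ext rfl (by simp)

-- ===== VERDICT (by name: the statement is the Claim_ definition above) =====
theorem generate_visible_houses_spec : Claim_equal_generate_visible_houses := by
  intro limit hdom
  unfold Spec_generate_visible_houses
  have hlim : limit ≤ 2147483648 := by
    unfold Dom_generate_visible_houses pvDomInt at hdom
    exact (of_decide_eq_true hdom).2
  have hbA : ∀ p ∈ pvLA limit, 0 ≤ p.1 ∧ p.1 < 8589934592 := by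
    intro p hp
    rw [pv_mem_LA] at hp
    omega
  rw [pvA_eq, pvB_eq, pv_sorted2_eq_sorted _ hbA]
  have hpw : (pvLA limit).Pairwise (fun a b => pvKey a < pvKey b) := by
    refine (pv_pairwise_LA limit).imp_of_mem ?_
    intro a b ha hbm h
    obtain ⟨ha1, ha2⟩ := hbA a ha
    obtain ⟨hb1, hb2⟩ := hbA b hbm
    unfold pvKey
    omega
  rw [PySem.List.sorted_eq_of_perm_of_pairwise_lt (pvLA limit) (pvLA limit) pvKey
      (List.Perm.refl _) hpw]
  -- B side: the sorted key list is the encoding of A's (already sorted) list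
  have hpwE : ((pvLA limit).map (pvEnc limit)).Pairwise (· < ·) := by
    rw [List.pairwise_map]
    refine (pv_pairwise_LA limit).imp_of_mem ?_
    intro a b ha hbm h
    have hA := (pv_mem_LA limit a).mp ha
    have hB := (pv_mem_LA limit b).mp hbm
    unfold pvEnc
    exact pv_enc_lt (limit + 1) (a.1 + a.2) a.1 (b.1 + b.2) b.1 (by omega) (by omega)
      (by omega) h
  rw [pv_keys_eq,
    PySem.List.sorted_eq_of_perm_of_pairwise_lt ((pvPts limit).map (pvEnc limit))
      ((pvLA limit).map (pvEnc limit)) (fun c => c) ((pv_perm limit).map _) hpwE,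
    List.map_map]
  conv_lhs => rw [← List.map_id (pvLA limit)]
  refine List.map_congr_left ?_
  intro p hp
  have h := (pv_mem_LA limit p).mp hp
  simp only [id, Function.comp]
  exact (pv_dec_enc limit p (by omega) (by omega) (by omega) (by omega)).symm
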